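-- pv_equiv track=rewrite | github.com/asksurf-ai/surf-cli | js/packages/sdk/scripts/gen_sdk.py | op_to_parts
-- ===== SOURCE A (Python) =====
-- DOMAIN_PREFIXES = sorted(
--     [
--         "prediction-market", "polymarket", "kalshi",
--         "market", "wallet", "social", "token", "project",
--         "fund", "onchain", "news", "exchange", "search", "web",
--     ],
--     key=len,
--     reverse=True,
-- )
--
-- def op_to_parts(op: str) -> tuple[str, str]:
--     """Convert operation name to (category, method_name): 'market-price' -> ('market', 'price')."""
--     for prefix in DOMAIN_PREFIXES:
--         if op == prefix:
--             return prefix, "list"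
--         if op.startswith(prefix + "-"):
--             rest = op[len(prefix) + 1:]
--             return prefix, rest.replace("-", "_")
--     parts = op.split("-", 1)
--     return parts[0], parts[1].replace("-", "_") if len(parts) > 1 else "get"
-- ===== SOURCE B (Python) =====
-- _PREFIX_SET = set([
--     "prediction-market", "polymarket", "kalshi",
--     "market", "wallet", "social", "token", "project",
--     "fund", "onchain", "news", "exchange", "search", "web",
-- ])
--
-- def op_to_parts(op: str) -> tuple[str, str]:
--     """Convert operation name to (category, method_name): 'market-price' -> ('market', 'price')."""
--     segments = op.split("-")
--     for i in range(len(segments), 0, -1):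
--         cand = "-".join(segments[:i])
--         if cand in _PREFIX_SET:
--             if i == len(segments):
--                 return cand, "list"
--             return cand, "_".join(segments[i:])
--     if len(segments) == 1:
--         return segments[0], "get"
--     return segments[0], "_".join(segments[1:])
-- ===== Notes on version B (the rewrite author's own statement) =====
-- stated objective: alternative
-- what changed: Instead of scanning the fixed length-sorted prefix table and testing each prefix against the string, B splits the operation name into dash-separated segments once and probes the string's own segment prefixes, longest first, against a prefix set.
import Mathlib
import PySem

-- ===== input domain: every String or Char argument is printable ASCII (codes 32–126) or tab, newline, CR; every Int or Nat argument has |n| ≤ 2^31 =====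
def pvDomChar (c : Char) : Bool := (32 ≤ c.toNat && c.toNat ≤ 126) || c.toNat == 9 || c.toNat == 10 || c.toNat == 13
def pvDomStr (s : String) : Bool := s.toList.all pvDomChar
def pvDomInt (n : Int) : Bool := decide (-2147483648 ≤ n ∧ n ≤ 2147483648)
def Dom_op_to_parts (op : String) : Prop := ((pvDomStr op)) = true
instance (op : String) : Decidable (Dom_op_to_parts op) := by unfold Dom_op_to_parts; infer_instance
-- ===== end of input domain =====

-- B rewrites A's scan of the fixed prefix table into a scan of the input's own '-'-boundary
-- prefixes, longest first, against a prefix set (objective: alternative shape, same cost).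

-- ===== PORT A =====
-- DOMAIN_PREFIXES = sorted([...], key=len, reverse=True): module-level constant,
-- written out in exactly the order Python's sorted() produces.
def domainPrefixes : List (List Char) :=
  ["prediction-market".toList, "polymarket".toList, "exchange".toList, "project".toList,
   "onchain".toList, "kalshi".toList, "market".toList, "wallet".toList, "social".toList,
   "search".toList, "token".toList, "fund".toList, "news".toList, "web".toList]

-- the 'for prefix in DOMAIN_PREFIXES' loop with its early returns; the [] case is the
-- code after the loop: parts = op.split("-", 1); parts is never empty, so parts[0] is
-- ported as headD and the len(parts)>1-guarded parts[1] as getD.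
def aGo (op : List Char) : List (List Char) → List Char × List Char
  | [] =>
      let parts := PySem.Chars.splitOnMax op ['-'] 1
      if parts.length > 1 then
        (parts.headD [], PySem.Chars.replace (parts.getD 1 []) ['-'] ['_'])
      else (parts.headD [], "get".toList)
  | p :: ps =>
      if op = p then (p, "list".toList)
      else if PySem.Chars.startswith op (p ++ ['-']) then
        -- rest = op[len(prefix) + 1:]
        (p, PySem.Chars.replace (PySem.List.slice op (some ((p.length : Int) + 1)) none) ['-'] ['_'])
      else aGo op ps

def op_to_parts (op : String) : String × String :=
  let r := aGo op.toList domainPrefixes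
  (String.ofList r.1, String.ofList r.2)

-- ===== PORT B =====
-- _PREFIX_SET = set([...]) (membership only; iteration order never used)
def prefixSet : PySem.Set (List Char) :=
  PySem.Set.ofList
    ["prediction-market".toList, "polymarket".toList, "kalshi".toList, "market".toList,
     "wallet".toList, "social".toList, "token".toList, "project".toList, "fund".toList,
     "onchain".toList, "news".toList, "exchange".toList, "search".toList, "web".toList]

-- the 'for i in range(len(segments), 0, -1)' loop (bGo segments i handles python index i);
-- the 0 case is the fallback code after the loop.
def bGo (segments : List (List Char)) : Nat → List Char × List Char
  | 0 =>
      if segments.length = 1 then (segments.headD [], "get".toList)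
      else (segments.headD [], PySem.Chars.join ['_'] (segments.drop 1))
  | i + 1 =>
      let cand := PySem.Chars.join ['-'] (segments.take (i + 1))
      if PySem.Set.contains prefixSet cand then
        if i + 1 = segments.length then (cand, "list".toList)
        else (cand, PySem.Chars.join ['_'] (segments.drop (i + 1)))
      else bGo segments i

def op_to_parts_alt (op : String) : String × String :=
  let segments := PySem.Chars.splitOn op.toList ['-']
  let r := bGo segments segments.length
  (String.ofList r.1, String.ofList r.2)

-- ===== PRECONDITION & SPEC =====
def Spec_op_to_parts (op : String) (out : String × String) : Prop := out = op_to_parts_alt op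
instance (op : String) (out : String × String) : Decidable (Spec_op_to_parts op out) := by unfold Spec_op_to_parts; infer_instance

-- ===== CLAIM (what is proved, stated in full; the proofs are below) =====
def Claim_equal_op_to_parts : Prop := ∀ (op : String), Dom_op_to_parts op → Spec_op_to_parts op (op_to_parts op)

-- ===== LEMMAS AND PROOFS =====

-- reference split-on-'-' function (structural recursion; both ports are reduced to it)
def sa : List Char → List (List Char)
  | [] => [[]]
  | c :: r => if c = '-' then [] :: sa r else (sa r).modifyHead (c :: ·)

-- reference join (jn c l = c.join(l) for a one-char separator)
def jn (c : Char) : List (List Char) → List Char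
  | [] => []
  | [x] => x
  | x :: y :: t => x ++ c :: jn c (y :: t)

-- '-' → '_' as a character map
def du (c : Char) : Char := if c = '-' then '_' else c

theorem sa_ne_nil (l : List Char) : sa l ≠ [] := by
  induction l with
  | nil => simp [sa]
  | cons c r ih =>
    simp only [sa]
    split_ifs
    · simp
    · cases h : sa r with
      | nil => exact absurd h ih
      | cons a t => simp [List.modifyHead]

theorem sa_no_dash (l : List Char) : ∀ x ∈ sa l, '-' ∉ x := by
  induction l with
  | nil => simp [sa]
  | cons c r ih =>
    simp only [sa]
    split_ifs with hc
    · intro x hx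
      rcases List.mem_cons.mp hx with h | h
      · simp [h]
      · exact ih x h
    · cases h : sa r with
      | nil => exact absurd h (sa_ne_nil r)
      | cons a t =>
        intro x hx
        rcases List.mem_cons.mp hx with h' | h'
        · subst h'
          have ha : '-' ∉ a := ih a (by simp [h])
          simp [List.mem_cons]
          exact ⟨fun hcc => hc hcc.symm, ha⟩
        · exact ih x (by simp [h, h'])

theorem jn_sa (l : List Char) : jn '-' (sa l) = l := by
  induction l with
  | nil => simp [sa, jn]
  | cons c r ih =>
    simp only [sa]
    split_ifs with hc
    · subst hc
      cases h : sa r with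
      | nil => exact absurd h (sa_ne_nil r)
      | cons a t => rw [h] at ih; simp [jn, ih]
    · cases h : sa r with
      | nil => exact absurd h (sa_ne_nil r)
      | cons a t =>
        rw [h] at ih
        cases t with
        | nil => simpa [List.modifyHead, jn] using congrArg (c :: ·) ih
        | cons b t' => simpa [List.modifyHead, jn] using congrArg (c :: ·) ih

theorem sa_no_dash_eq {l : List Char} (h : '-' ∉ l) : sa l = [l] := by
  induction l with
  | nil => simp [sa]
  | cons c r ih =>
    have hc : c ≠ '-' := fun hc => h (by simp [hc])
    have hr : '-' ∉ r := fun hr => h (by simp [hr])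
    simp [sa, hc, ih hr, List.modifyHead]

theorem sa_append_dash {w : List Char} (hw : '-' ∉ w) (r : List Char) :
    sa (w ++ '-' :: r) = w :: sa r := by
  induction w with
  | nil => simp [sa]
  | cons c w' ih =>
    have hc : c ≠ '-' := fun hc => hw (by simp [hc])
    have hw' : '-' ∉ w' := fun h => hw (by simp [h])
    simp [sa, hc, ih hw', List.modifyHead]

theorem splitOn_go_eq (fuel : Nat) :
    ∀ (l cur : List Char) (acc : List (List Char)), l.length ≤ fuel →
      PySem.Chars.splitOn.go ['-'] fuel l cur acc
        = acc.reverse ++ (sa l).modifyHead (cur.reverse ++ ·) := by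
  induction fuel with
  | zero =>
    intro l cur acc hl
    have : l = [] := List.eq_nil_of_length_eq_zero (Nat.le_zero.mp hl)
    subst this
    simp [PySem.Chars.splitOn.go, sa, List.modifyHead]
  | succ fuel ih =>
    intro l cur acc hl
    cases l with
    | nil => simp [PySem.Chars.splitOn.go, sa, List.modifyHead]
    | cons c rest =>
      by_cases hc : c = '-'
      · subst hc
        have hpre : List.isPrefixOf ['-'] ('-' :: rest) = true := by simp [List.isPrefixOf]
        rw [show PySem.Chars.splitOn.go ['-'] (fuel+1) ('-' :: rest) cur acc
              = PySem.Chars.splitOn.go ['-'] fuel (List.drop (List.length ['-']) ('-'::rest)) [] (cur.reverse :: acc) by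
            simp [PySem.Chars.splitOn.go, hpre]]
        rw [ih _ _ _ (by simpa using Nat.le_of_succ_le_succ (Nat.succ_le_of_lt (Nat.lt_succ_of_le (by simpa using hl))))]
        cases h : sa rest with
        | nil => exact absurd h (sa_ne_nil rest)
        | cons a t => simp [sa, h, List.modifyHead]
      · have hpre : List.isPrefixOf ['-'] (c :: rest) = false := by
          simp [List.isPrefixOf]; exact fun h => absurd h.symm hc
        rw [show PySem.Chars.splitOn.go ['-'] (fuel+1) (c :: rest) cur acc
              = PySem.Chars.splitOn.go ['-'] fuel rest (c :: cur) acc by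
            simp [PySem.Chars.splitOn.go, hpre]]
        rw [ih _ _ _ (by simpa using hl)]
        cases h : sa rest with
        | nil => exact absurd h (sa_ne_nil rest)
        | cons a t => simp [sa, h, hc, List.modifyHead]

theorem splitOn_eq_sa (l : List Char) : PySem.Chars.splitOn l ['-'] = sa l := by
  rw [show PySem.Chars.splitOn l ['-'] = PySem.Chars.splitOn.go ['-'] (l.length + 1) l [] [] from rfl]
  rw [splitOn_go_eq _ _ _ _ (Nat.le_succ _)]
  cases h : sa l with
  | nil => exact absurd h (sa_ne_nil l)
  | cons a t => simp [List.modifyHead]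

-- splitOnMax.go with exhausted budget returns the remainder as one piece
theorem splitOnMax_go_zero (fuel : Nat) (r cur : List Char) (acc : List (List Char)) :
    PySem.Chars.splitOnMax.go ['-'] fuel 0 r cur acc = acc.reverse ++ [cur.reverse ++ r] := by
  cases fuel with
  | zero => simp [PySem.Chars.splitOnMax.go]
  | succ fuel => cases r with
    | nil => simp [PySem.Chars.splitOnMax.go]
    | cons c rest => simp [PySem.Chars.splitOnMax.go]

theorem splitOnMax_go_one_nodash (fuel : Nat) :
    ∀ (l cur : List Char) (acc : List (List Char)), l.length ≤ fuel → '-' ∉ l →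
      PySem.Chars.splitOnMax.go ['-'] fuel 1 l cur acc = acc.reverse ++ [cur.reverse ++ l] := by
  induction fuel with
  | zero =>
    intro l cur acc hl _
    have : l = [] := List.eq_nil_of_length_eq_zero (Nat.le_zero.mp hl)
    subst this; simp [PySem.Chars.splitOnMax.go]
  | succ fuel ih =>
    intro l cur acc hl hnd
    cases l with
    | nil => simp [PySem.Chars.splitOnMax.go]
    | cons c rest =>
      have hc : c ≠ '-' := fun h => hnd (by simp [h])
      have hpre : List.isPrefixOf ['-'] (c :: rest) = false := by
        simp [List.isPrefixOf]; exact fun h => absurd h.symm hc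
      rw [show PySem.Chars.splitOnMax.go ['-'] (fuel+1) 1 (c :: rest) cur acc
            = PySem.Chars.splitOnMax.go ['-'] fuel 1 rest (c :: cur) acc by
          simp [PySem.Chars.splitOnMax.go, hpre]]
      rw [ih _ _ _ (by simpa using hl) (fun h => hnd (by simp [h]))]
      simp

theorem splitOnMax_go_one_dash (w : List Char) :
    ∀ (fuel : Nat) (r cur : List Char) (acc : List (List Char)),
      (w ++ '-' :: r).length ≤ fuel → '-' ∉ w →
      PySem.Chars.splitOnMax.go ['-'] fuel 1 (w ++ '-' :: r) cur acc
        = acc.reverse ++ [cur.reverse ++ w, r] := by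
  induction w with
  | nil =>
    intro fuel r cur acc hl _
    cases fuel with
    | zero => simp at hl
    | succ fuel =>
      have hpre : List.isPrefixOf ['-'] ('-' :: r) = true := by simp [List.isPrefixOf]
      rw [show PySem.Chars.splitOnMax.go ['-'] (fuel+1) 1 ([] ++ '-' :: r) cur acc
            = PySem.Chars.splitOnMax.go ['-'] fuel 0 r [] (cur.reverse :: acc) by
          simp [PySem.Chars.splitOnMax.go, hpre]]
      rw [splitOnMax_go_zero]
      simp
  | cons c w' ih =>
    intro fuel r cur acc hl hw
    cases fuel with
    | zero => simp at hl
    | succ fuel =>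
      have hc : c ≠ '-' := fun h => hw (by simp [h])
      have hpre : List.isPrefixOf ['-'] (c :: (w' ++ '-' :: r)) = false := by
        simp [List.isPrefixOf]; exact fun h => absurd h.symm hc
      rw [show PySem.Chars.splitOnMax.go ['-'] (fuel+1) 1 ((c :: w') ++ '-' :: r) cur acc
            = PySem.Chars.splitOnMax.go ['-'] fuel 1 (w' ++ '-' :: r) (c :: cur) acc by
          simp [PySem.Chars.splitOnMax.go, hpre]]
      rw [ih _ _ _ _ (by simpa using Nat.le_of_succ_le_succ (by simpa using hl)) (fun h => hw (by simp [h]))]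
      simp

theorem splitMax1_nodash {l : List Char} (h : '-' ∉ l) :
    PySem.Chars.splitOnMax l ['-'] 1 = [l] := by
  rw [show PySem.Chars.splitOnMax l ['-'] 1
        = PySem.Chars.splitOnMax.go ['-'] (l.length + 1) (Int.toNat 1) l [] [] by
      simp [PySem.Chars.splitOnMax]]
  rw [show Int.toNat 1 = 1 from rfl]
  rw [splitOnMax_go_one_nodash _ _ _ _ (Nat.le_succ _) h]
  simp

theorem splitMax1_dash {w : List Char} (r : List Char) (hw : '-' ∉ w) :
    PySem.Chars.splitOnMax (w ++ '-' :: r) ['-'] 1 = [w, r] := by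
  rw [show PySem.Chars.splitOnMax (w ++ '-' :: r) ['-'] 1
        = PySem.Chars.splitOnMax.go ['-'] ((w ++ '-' :: r).length + 1) (Int.toNat 1) (w ++ '-' :: r) [] [] by
      simp [PySem.Chars.splitOnMax]]
  rw [show Int.toNat 1 = 1 from rfl]
  rw [splitOnMax_go_one_dash _ _ _ _ _ (Nat.le_succ _) hw]
  simp

theorem replace_go_eq (fuel : Nat) :
    ∀ (l acc : List Char), l.length ≤ fuel →
      PySem.Chars.replace.go ['-'] ['_'] fuel l acc = acc.reverse ++ l.map du := by
  induction fuel with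
  | zero =>
    intro l acc hl
    have : l = [] := List.eq_nil_of_length_eq_zero (Nat.le_zero.mp hl)
    subst this; simp [PySem.Chars.replace.go]
  | succ fuel ih =>
    intro l acc hl
    cases l with
    | nil => simp [PySem.Chars.replace.go]
    | cons c rest =>
      by_cases hc : c = '-'
      · subst hc
        have hpre : List.isPrefixOf ['-'] ('-' :: rest) = true := by simp [List.isPrefixOf]
        rw [show PySem.Chars.replace.go ['-'] ['_'] (fuel+1) ('-' :: rest) acc
              = PySem.Chars.replace.go ['-'] ['_'] fuel rest ('_' :: acc) by
            simp [PySem.Chars.replace.go, hpre]]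
        rw [ih _ _ (by simpa using hl)]
        simp [du]
      · have hpre : List.isPrefixOf ['-'] (c :: rest) = false := by
          simp [List.isPrefixOf]; exact fun h => absurd h.symm hc
        rw [show PySem.Chars.replace.go ['-'] ['_'] (fuel+1) (c :: rest) acc
              = PySem.Chars.replace.go ['-'] ['_'] fuel rest (c :: acc) by
            simp [PySem.Chars.replace.go, hpre]]
        rw [ih _ _ (by simpa using hl)]
        simp [du, hc]

theorem replace_dash (l : List Char) :
    PySem.Chars.replace l ['-'] ['_'] = l.map du := by
  rw [show PySem.Chars.replace l ['-'] ['_'] = PySem.Chars.replace.go ['-'] ['_'] l.length l [] by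
      simp [PySem.Chars.replace]]
  rw [replace_go_eq _ _ _ (Nat.le_refl _)]
  simp

theorem map_du_id {x : List Char} (h : '-' ∉ x) : x.map du = x := by
  induction x with
  | nil => simp
  | cons c t ih =>
    have hc : c ≠ '-' := fun hc => h (by simp [hc])
    simp [du, hc, ih (fun ht => h (by simp [ht]))]

theorem map_du_jn (l : List (List Char)) (h : ∀ x ∈ l, '-' ∉ x) :
    (jn '-' l).map du = jn '_' l := by
  induction l with
  | nil => simp [jn]
  | cons x t ih =>
    cases t with
    | nil => simp [jn, map_du_id (h x (by simp))]
    | cons y t' =>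
      have := ih (fun z hz => h z (by simp [hz]))
      simp [jn, map_du_id (h x (by simp)), du, this]

theorem join_eq_jn (c : Char) (l : List (List Char)) :
    PySem.Chars.join [c] l = jn c l := by
  induction l with
  | nil => simp [PySem.Chars.join, List.intercalate, jn]
  | cons x t ih =>
    cases t with
    | nil => simp [PySem.Chars.join, List.intercalate, jn]
    | cons y t' =>
      simp only [jn, ← ih]
      simp [PySem.Chars.join, List.intercalate]

theorem prefix_dash {w s0 : List Char} (u r : List Char) (hw : '-' ∉ w) (hs : '-' ∉ s0) :
    ((w ++ '-' :: u) <+: (s0 ++ '-' :: r)) ↔ (w = s0 ∧ u <+: r) := by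
  induction w generalizing s0 with
  | nil =>
    cases s0 with
    | nil => simp [List.cons_prefix_cons]
    | cons c s0' =>
      have hc : c ≠ '-' := fun h => hs (by simp [h])
      simp [List.cons_prefix_cons]
      intro h
      exact absurd h.symm hc
  | cons a w' ih =>
    have ha : a ≠ '-' := fun h => hw (by simp [h])
    cases s0 with
    | nil =>
      simp [List.cons_prefix_cons]
      intro h
      exact absurd h ha
    | cons c s0' =>
      have hw' : '-' ∉ w' := fun h => hw (by simp [h])
      have hs' : '-' ∉ s0' := fun h => hs (by simp [h])
      simp [List.cons_prefix_cons, ih hw' hs', and_assoc]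

theorem eq_dash {w s0 : List Char} (u r : List Char) (hw : '-' ∉ w) (hs : '-' ∉ s0) :
    (w ++ '-' :: u = s0 ++ '-' :: r) ↔ (w = s0 ∧ u = r) := by
  induction w generalizing s0 with
  | nil =>
    cases s0 with
    | nil => simp
    | cons c s0' =>
      have hc : c ≠ '-' := fun h => hs (by simp [h])
      simp
      intro h
      exact absurd h.symm hc
  | cons a w' ih =>
    have ha : a ≠ '-' := fun h => hw (by simp [h])
    cases s0 with
    | nil =>
      simp
      intro h
      exact absurd h ha
    | cons c s0' =>
      have hw' : '-' ∉ w' := fun h => hw (by simp [h])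
      have hs' : '-' ∉ s0' := fun h => hs (by simp [h])
      simp [ih hw' hs', and_assoc]

theorem no_dash_not_prefix {l : List Char} (w : List Char) (h : '-' ∉ l) :
    ¬ ((w ++ ['-']) <+: l) := by
  intro hp
  exact h (hp.subset (by simp))

theorem one_seg_ne {p : List Char} (s0 r : List Char) (hp : '-' ∉ p) :
    p ≠ s0 ++ '-' :: r := by
  intro h
  exact hp (h ▸ (by simp : '-' ∈ s0 ++ '-' :: r))

-- the two prefix tables have the same members
theorem mem_prefixSet_iff (x : List Char) : x ∈ prefixSet ↔ x ∈ domainPrefixes := by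
  have h : prefixSet.Perm domainPrefixes := by decide
  exact h.mem_iff

-- A's loop on a dash-free op: any match returns (op, "list"); the fallback returns (op, "get")
theorem aGo_nodash {op : List Char} (h : '-' ∉ op) (P : List (List Char)) :
    aGo op P = if op ∈ P then (op, "list".toList) else (op, "get".toList) := by
  induction P with
  | nil => simp [aGo, splitMax1_nodash h]
  | cons p ps ih =>
    by_cases he : op = p
    · subst he; simp [aGo]
    · have hsw : PySem.Chars.startswith op (p ++ ['-']) = false := by
        rw [← Bool.not_eq_true, PySem.Chars.startswith_iff]
        exact no_dash_not_prefix p h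
      simp [aGo, he, hsw, ih, List.mem_cons]

-- A's loop over dash-free prefixes on a dashed op: match and fallback agree
theorem aGo_dashed {s0 : List Char} (r : List Char) (hs : '-' ∉ s0)
    (P : List (List Char)) (hP : ∀ p ∈ P, '-' ∉ p) :
    aGo (s0 ++ '-' :: r) P = (s0, PySem.Chars.replace r ['-'] ['_']) := by
  induction P with
  | nil =>
    simp [aGo, splitMax1_dash r hs]
  | cons p ps ih =>
    have hp : '-' ∉ p := hP p (by simp)
    have hne : s0 ++ '-' :: r ≠ p := (one_seg_ne s0 r hp).symm
    by_cases hsw : p = s0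
    · subst hsw
      have hpre : PySem.Chars.startswith (p ++ '-' :: r) (p ++ ['-']) = true := by
        rw [PySem.Chars.startswith_iff]
        exact (prefix_dash [] r hp hp).mpr ⟨rfl, by simp⟩
      have hslice : PySem.List.slice (p ++ '-' :: r) (some ((p.length : Int) + 1)) none = r := by
        rw [show ((p.length : Int) + 1) = ((p.length + 1 : Nat) : Int) by push_cast; ring]
        rw [PySem.List.slice_from _ (by positivity)]
        rw [show p ++ '-' :: r = (p ++ ['-']) ++ r by simp]
        rw [Int.toNat_natCast]
        rw [show p.length + 1 = (p ++ ['-']).length by simp]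
        exact List.drop_left
      simp [aGo, hne, hpre, hslice]
    · have hpre : PySem.Chars.startswith (s0 ++ '-' :: r) (p ++ ['-']) = false := by
        rw [← Bool.not_eq_true, PySem.Chars.startswith_iff]
        rw [show p ++ ['-'] = p ++ '-' :: ([] : List Char) from rfl]
        rw [prefix_dash [] r hp hs]
        exact fun hc => hsw hc.1
      simp [aGo, hne, hpre]
      exact ih (fun q hq => hP q (by simp [hq]))

-- counting dashes in a join of dash-free pieces
theorem count_dash_jn (l : List (List Char)) (h : ∀ x ∈ l, '-' ∉ x) (hne : l ≠ []) :
    List.count '-' (jn '-' l) = l.length - 1 := by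
  induction l with
  | nil => exact absurd rfl hne
  | cons x t ih =>
    cases t with
    | nil =>
      simp [jn, List.count_eq_zero]
      exact h x (by simp)
    | cons y t' =>
      have hx : '-' ∉ x := h x (by simp)
      have := ih (fun z hz => h z (by simp [hz])) (by simp)
      simp [jn, List.count_append, List.count_eq_zero.mpr hx, this]

theorem mem_prefixSet_count {x : List Char} (h : x ∈ prefixSet) : List.count '-' x ≤ 1 := by
  rw [prefixSet, PySem.Set.mem_ofList] at h
  fin_cases h <;> decide

-- B's loop never matches a candidate with 3 or more segments
theorem bGo_collapse (segs : List (List Char)) (hnd : ∀ x ∈ segs, '-' ∉ x) :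
    ∀ (k i : Nat), i = 2 + k → i ≤ segs.length → bGo segs i = bGo segs 2 := by
  intro k
  induction k with
  | zero => intro i hi _; subst hi; rfl
  | succ k ih =>
    intro i hi hle
    subst hi
    have hlen : (segs.take (2 + k + 1)).length = 2 + k + 1 := by
      simp [List.length_take]
      omega
    have htne : segs.take (2 + k + 1) ≠ [] := by
      intro h
      rw [h] at hlen
      simp at hlen
    have hcand : PySem.Chars.join ['-'] (segs.take (2 + k + 1)) ∉ prefixSet := by
      intro hmem
      have hc := mem_prefixSet_count hmem
      rw [join_eq_jn, count_dash_jn _ (fun x hx => hnd x (List.mem_of_mem_take hx)) htne, hlen] at hc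
      omega
    rw [show (2 + (k + 1)) = (2 + k) + 1 by ring]
    rw [show bGo segs ((2 + k) + 1) = bGo segs (2 + k) by simp [bGo, hcand]]
    exact ih (2 + k) rfl (by omega)

-- the central equivalence on char lists
theorem key (l : List Char) : aGo l domainPrefixes = bGo (sa l) (sa l).length := by
  by_cases hd : '-' ∈ l
  · -- op contains a dash: decompose at the first one
    obtain ⟨s0, tail, hsa⟩ : ∃ s0 tail, sa l = s0 :: tail := by
      cases h : sa l with
      | nil => exact absurd h (sa_ne_nil l)
      | cons a t => exact ⟨a, t, rfl⟩
    have hs0 : '-' ∉ s0 := sa_no_dash l s0 (by simp [hsa])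
    cases tail with
    | nil =>
      exfalso
      have := jn_sa l
      rw [hsa] at this
      simp [jn] at this
      exact hs0 (this ▸ hd)
    | cons t0 rest2 =>
      have ht0 : '-' ∉ t0 := sa_no_dash l t0 (by simp [hsa])
      have hrest2 : ∀ x ∈ rest2, '-' ∉ x := fun x hx => sa_no_dash l x (by simp [hsa, hx])
      set r : List Char := jn '-' (t0 :: rest2) with hr
      have hl : l = s0 ++ '-' :: r := by
        have := jn_sa l
        rw [hsa] at this
        simpa [jn] using this.symm
      have hsar : sa r = t0 :: rest2 := by
        have := sa_append_dash hs0 r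
        rw [← hl, hsa] at this
        exact (List.cons.injEq .. ▸ this).2.symm ▸ rfl
      have hnd : ∀ x ∈ (s0 :: t0 :: rest2 : List (List Char)), '-' ∉ x := by
        intro x hx
        exact sa_no_dash l x (by rw [hsa]; exact hx)
      rw [hsa]
      have hlen2 : (s0 :: t0 :: rest2 : List (List Char)).length = 2 + rest2.length := by
        simp; ring
      rw [bGo_collapse _ hnd rest2.length _ hlen2 (le_refl _)]
      have hpmdec : "prediction-market".toList = "prediction".toList ++ '-' :: "market".toList := by decide
      have hpmdash : "prediction-market".toList ++ ['-']
          = "prediction".toList ++ '-' :: ("market".toList ++ ['-']) := by decide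
      by_cases hpm : s0 = "prediction".toList ∧ t0 = "market".toList
      · obtain ⟨rfl, rfl⟩ := hpm
        cases rest2 with
        | nil =>
          have hrm : r = "market".toList := by rw [hr]; simp [jn]
          have hll : l = "prediction-market".toList := by rw [hl, hrm]; decide
          rw [hll]
          decide
        | cons u us =>
          have hru : r = "market".toList ++ '-' :: jn '-' (u :: us) := by rw [hr]; simp [jn]
          have hne1 : l ≠ "prediction-market".toList := by
            rw [hl, hru, hpmdec]
            intro h
            obtain ⟨-, h2⟩ := (eq_dash _ _ (by decide) (by decide)).mp h
            exact one_seg_ne _ _ (by decide) h2.symm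
          have hsw : PySem.Chars.startswith l ("prediction-market".toList ++ ['-']) = true := by
            rw [PySem.Chars.startswith_iff, hl, hru, hpmdash]
            refine (prefix_dash _ _ (by decide) (by decide)).mpr ⟨rfl, ?_⟩
            rw [show "market".toList ++ ['-'] = "market".toList ++ '-' :: ([] : List Char) from rfl]
            exact (prefix_dash _ _ (by decide) (by decide)).mpr ⟨rfl, List.nil_prefix⟩
          have hl18 : l = ("prediction-market".toList ++ ['-']) ++ jn '-' (u :: us) := by
            rw [hl, hru, hpmdash]
            simp
          have hslice : PySem.List.slice l (some (("prediction-market".toList.length : Int) + 1)) none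
              = jn '-' (u :: us) := by
            rw [show (("prediction-market".toList.length : Int) + 1) = ((18 : Nat) : Int) by decide]
            rw [PySem.List.slice_from _ (by norm_num)]
            rw [hl18, Int.toNat_natCast,
              show (18 : Nat) = ("prediction-market".toList ++ ['-']).length by decide]
            exact List.drop_left
          have hLHS : aGo l domainPrefixes
              = ("prediction-market".toList, PySem.Chars.replace (jn '-' (u :: us)) ['-'] ['_']) := by
            conv_lhs => rw [show domainPrefixes = "prediction-market".toList :: domainPrefixes.tail from rfl]
            simp only [aGo]
            rw [if_neg hne1, if_pos hsw, hslice]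
          rw [hLHS, replace_dash,
            map_du_jn _ (fun x hx => hnd x (by simp [List.mem_cons] at hx ⊢; tauto))]
          simp [bGo, join_eq_jn, jn, hpmdec]
          decide
      · -- the two-segment candidate does not match
        have hne1 : l ≠ "prediction-market".toList := by
          rw [hl, hpmdec]
          intro h
          obtain ⟨h1, h2⟩ := (eq_dash r "market".toList hs0 (by decide)).mp h
          have : sa r = ["market".toList] := by rw [h2]; decide
          rw [hsar] at this
          obtain ⟨ht, hrr⟩ := List.cons.injEq .. ▸ this
          exact hpm ⟨h1, ht⟩
        have hsw : PySem.Chars.startswith l ("prediction-market".toList ++ ['-']) = false := by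
          rw [← Bool.not_eq_true, PySem.Chars.startswith_iff, hl, hpmdash]
          intro h
          obtain ⟨h1, h2⟩ := (prefix_dash _ _ (by decide) hs0).mp h
          cases rest2 with
          | nil =>
            have hrt : r = t0 := by rw [hr]; simp [jn]
            exact no_dash_not_prefix _ (hrt ▸ ht0) h2
          | cons u us =>
            have hru : r = t0 ++ '-' :: jn '-' (u :: us) := by rw [hr]; simp [jn]
            rw [hru] at h2
            rw [show "market".toList ++ ['-'] = "market".toList ++ '-' :: ([] : List Char) from rfl] at h2
            obtain ⟨hm, -⟩ := (prefix_dash _ _ (by decide) ht0).mp h2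
            exact hpm ⟨h1.symm, hm.symm⟩
        have hLHS : aGo l domainPrefixes = (s0, PySem.Chars.replace r ['-'] ['_']) := by
          have : aGo l domainPrefixes = aGo l (domainPrefixes.tail) := by
            conv_lhs => rw [show domainPrefixes = "prediction-market".toList :: domainPrefixes.tail from rfl]
            simp only [aGo]
            rw [if_neg hne1, if_neg (by rw [hsw]; exact Bool.false_ne_true)]
          rw [this, hl]
          exact aGo_dashed r hs0 _ (by decide)
        rw [hLHS, replace_dash, hr,
          map_du_jn _ (fun x hx => hnd x (by simp [List.mem_cons] at hx ⊢; tauto))]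
        have hcand2 : s0 ++ '-' :: t0 ∉ prefixSet := by
          intro hmem
          rw [mem_prefixSet_iff] at hmem
          simp only [domainPrefixes, List.mem_cons, List.not_mem_nil, or_false] at hmem
          rcases hmem with h | h | h | h | h | h | h | h | h | h | h | h | h | h
          · rw [hpmdec] at h
            exact hpm ((eq_dash t0 "market".toList hs0 (by decide)).mp h)
          all_goals exact one_seg_ne s0 t0 (by decide) h.symm
        by_cases hm1 : s0 ∈ prefixSet
        · simp [bGo, hcand2, hm1, join_eq_jn, jn]
        · simp [bGo, hcand2, hm1, join_eq_jn, jn]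
  · -- op has no dash
    have hsa : sa l = [l] := sa_no_dash_eq hd
    rw [aGo_nodash hd]
    rw [hsa]
    have hc1 : PySem.Chars.join ['-'] [l] = l := by simp
    by_cases hm : l ∈ domainPrefixes
    · have hmS : l ∈ prefixSet := (mem_prefixSet_iff l).mpr hm
      simp [bGo, hc1, hmS, hm]
    · have hmS : l ∉ prefixSet := fun h => hm ((mem_prefixSet_iff l).mp h)
      simp [bGo, hc1, hmS, hm]

-- ===== VERDICT (by name: the statement is the Claim_ definition above) =====
theorem op_to_parts_spec : Claim_equal_op_to_parts := by
  intro op _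
  unfold Spec_op_to_parts op_to_parts op_to_parts_alt
  rw [splitOn_eq_sa, key]
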